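-- pv_equiv track=rewrite | github.com/gokou00/python_programming_challenges | coderbyte/StringChanges.py | StringChanges
-- ===== SOURCE A (Python) =====
-- def StringChanges(string):
--     buildStr = ""
--     strArry = list(string)
--     count = 0
--
--     while count < len(strArry):
--         if strArry[count] == "M" and count-1 >= 0:
--             strArry[count] = strArry[count-1]
--             #del strArry[count]
--             count = 0
--             buildStr = ""
--             continue
--         elif strArry[count] == "M" and count -1 < 0:
--             del strArry[count]
--             count = 0
--             buildStr = ""
--             continue
--
--         elif strArry[count] == "N" and count + 1 < len(strArry):
--             del strArry[count]
--             del strArry[count]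
--             count = 0
--             buildStr = ""
--         elif strArry[count] == "N" and count + 1 >= len(strArry):
--             del strArry[count]
--             count  = 0
--             buildStr = ""
--             continue
--         else:
--             #buildStr += strArry[count].lower()
--             count += 1
--
--
--     return "".join(strArry)
-- ===== SOURCE B (Python) =====
-- def StringChanges(string):
--     out = []
--     i = 0
--     while i < len(string):
--         c = string[i]
--         if c == 'M':
--             if out:
--                 out.append(out[-1])
--             i += 1
--         elif c == 'N':
--             i += 2
--         else:
--             out.append(c)
--             i += 1
--     return "".join(out)
-- ===== Notes on version B (the rewrite author's own statement) =====
-- stated objective: alternative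
-- what changed: Replaced A's restart-from-zero rescanning loop over a mutable list with a single left-to-right pass keeping an output stack (M duplicates the stack top, N skips itself and the next character).
import Mathlib
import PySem

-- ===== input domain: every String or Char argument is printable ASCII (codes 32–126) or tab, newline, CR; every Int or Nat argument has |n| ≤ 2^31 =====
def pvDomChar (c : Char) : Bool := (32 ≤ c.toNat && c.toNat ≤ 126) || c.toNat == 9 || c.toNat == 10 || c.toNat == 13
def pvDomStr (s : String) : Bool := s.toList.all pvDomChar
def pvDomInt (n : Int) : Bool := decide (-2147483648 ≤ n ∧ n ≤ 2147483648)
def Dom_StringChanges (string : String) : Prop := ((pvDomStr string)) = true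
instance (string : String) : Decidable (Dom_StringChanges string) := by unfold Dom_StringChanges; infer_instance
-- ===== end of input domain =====

-- B replaces A's restart-from-zero rescanning over a mutable list by one left-to-right
-- pass with an output stack (objective: alternative algorithm, same observed cost).


-- ===== PORT A =====
-- A's while-loop: acts on the mutable char list `arr` at index `count`; every
-- modification resets `count` to 0.  `fuel` is a totality guard only (Python's
-- loop has none); the proofs show the initial fuel below is always sufficient.
def loopA : Nat → List Char → Nat → List Char
  | 0, arr, _ => arr
  | fuel+1, arr, count =>
    if count < arr.length then
      if arr.getD count ' ' == 'M' && decide (1 ≤ count) then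
        -- strArry[count] = strArry[count-1]; count = 0
        loopA fuel (arr.set count (arr.getD (count-1) ' ')) 0
      else if arr.getD count ' ' == 'M' then
        -- del strArry[count]; count = 0
        loopA fuel (arr.eraseIdx count) 0
      else if arr.getD count ' ' == 'N' && decide (count+1 < arr.length) then
        -- del strArry[count]; del strArry[count]; count = 0
        loopA fuel ((arr.eraseIdx count).eraseIdx count) 0
      else if arr.getD count ' ' == 'N' then
        -- del strArry[count]; count = 0
        loopA fuel (arr.eraseIdx count) 0
      else
        loopA fuel arr (count+1)
    else arr

def StringChanges (string : String) : String :=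
  String.mk (loopA ((string.toList.length + 1) * (3 * string.toList.length + 1)) string.toList 0)

-- ===== PORT B =====
-- B's while-loop over the index i becomes structural recursion on the remaining
-- characters; `acc` is the output list `out` kept reversed (append = cons).
def loopB : List Char → List Char → List Char
  | [], acc => acc.reverse
  | c :: rest, acc =>
    if c == 'M' then
      match acc with
      | [] => loopB rest []
      | t :: acc' => loopB rest (t :: t :: acc')   -- out.append(out[-1])
    else if c == 'N' then
      loopB rest.tail acc                           -- i += 2
    else
      loopB rest (c :: acc)
termination_by l _ => l.length
decreasing_by all_goals simp [List.length_tail] <;> omega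

def StringChanges_alt (string : String) : String :=
  String.mk (loopB string.toList [])

-- ===== PRECONDITION & SPEC =====
def Spec_StringChanges (string : String) (out : String) : Prop := out = StringChanges_alt string
instance (string : String) (out : String) : Decidable (Spec_StringChanges string out) := by unfold Spec_StringChanges; infer_instance

-- ===== CLAIM (what is proved, stated in full; the proofs are below) =====
def Claim_equal_StringChanges : Prop := ∀ (string : String), Dom_StringChanges string → Spec_StringChanges string (StringChanges string)

-- ===== LEMMAS AND PROOFS =====

-- a list is "clean" when it contains no 'M' and no 'N'
def pvClean (l : List Char) : Prop := ∀ c ∈ l, (c == 'M' || c == 'N') = false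

-- one unfolding of A's loop when the index is in range
theorem loopA_succ (f : Nat) (arr : List Char) (count : Nat) (h : count < arr.length) :
    loopA (f+1) arr count =
      if arr[count]?.getD ' ' = 'M' ∧ 1 ≤ count then
        loopA f (arr.set count (arr[count-1]?.getD ' ')) 0
      else if arr[count]?.getD ' ' = 'M' then loopA f (arr.eraseIdx count) 0
      else if arr[count]?.getD ' ' = 'N' ∧ count + 1 < arr.length then
        loopA f ((arr.eraseIdx count).eraseIdx count) 0
      else if arr[count]?.getD ' ' = 'N' then loopA f (arr.eraseIdx count) 0
      else loopA f arr (count+1) := by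
  simp [loopA, h]

theorem loopA_stop (fuel : Nat) (arr : List Char) (count : Nat) (h : ¬ count < arr.length) :
    loopA fuel arr count = arr := by
  cases fuel with
  | zero => simp [loopA]
  | succ f => simp [loopA, h]

theorem getAt (P S : List Char) (c : Char) : (P ++ c :: S)[P.length]? = some c := by
  rw [List.getElem?_append_right (le_refl _)]
  simp

theorem getPrev (Q S : List Char) (t : Char) :
    ((Q ++ [t]) ++ S)[(Q ++ [t]).length - 1]? = some t := by
  have h1 : (Q ++ [t]).length - 1 < (Q ++ [t]).length := by simp
  rw [List.getElem?_append_left h1]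
  have : (Q ++ [t]).length - 1 = Q.length := by simp
  rw [this]
  exact getAt Q [] t

theorem setAt (P S : List Char) (c x : Char) :
    (P ++ c :: S).set P.length x = P ++ x :: S := by
  rw [List.set_append_right _ _ (le_refl _)]
  simp

-- deleting the element just after a prefix
theorem eraseIdx_len (l l' : List Char) : (l ++ l').eraseIdx l.length = l ++ l'.eraseIdx 0 := by
  induction l with
  | nil => simp
  | cons a t ih => simp [List.eraseIdx, ih]

theorem pvClean_append {P : List Char} {c : Char} (hP : pvClean P)
    (hc : (c == 'M' || c == 'N') = false) : pvClean (P ++ [c]) := by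
  intro x hx
  rcases List.mem_append.1 hx with h | h
  · exact hP x h
  · simp at h; subst h; exact hc

theorem pvClean_ne {P : List Char} {c : Char} (hP : pvClean P) (h : c ∈ P) :
    c ≠ 'M' ∧ c ≠ 'N' := by
  have hc := hP c h
  constructor <;> intro he <;> rw [he] at hc <;> simp at hc

-- unfoldings of B's pass, one per shape of step
theorem loopB_nil (acc : List Char) : loopB [] acc = acc.reverse := by
  rw [loopB.eq_def]

theorem loopB_M_nil (rest : List Char) : loopB ('M' :: rest) [] = loopB rest [] := by
  rw [loopB.eq_def]; simp

theorem loopB_M_cons (rest : List Char) (t : Char) (acc' : List Char) :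
    loopB ('M' :: rest) (t :: acc') = loopB rest (t :: t :: acc') := by
  rw [loopB.eq_def]; simp

theorem loopB_N (rest acc : List Char) : loopB ('N' :: rest) acc = loopB rest.tail acc := by
  rw [loopB.eq_def]; simp

theorem loopB_other {c : Char} (rest acc : List Char) (h1 : c ≠ 'M') (h2 : c ≠ 'N') :
    loopB (c :: rest) acc = loopB rest (c :: acc) := by
  rw [loopB.eq_def]; simp [h1, h2]

-- fuel bookkeeping: one step plus a rescan of the prefix still leaves enough fuel
theorem fuel_arith {S S' m m' f p : Nat} (hfuel : S * m ≤ f + 1) (hS : S' ≤ S)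
    (hm : m' + 1 ≤ m) (hp : p + 1 ≤ S) : S' * m' ≤ f - p := by
  apply Nat.le_sub_of_add_le
  have h1 : S' * m' ≤ S * m' := Nat.mul_le_mul_right _ hS
  have h2 : S * m' + S ≤ S * m := by
    calc S * m' + S = S * (m' + 1) := by ring
    _ ≤ S * m := Nat.mul_le_mul_left _ hm
  linarith

theorem scan_arith {S m f p : Nat} (hfuel : S * m ≤ f + 1) (hm : 1 ≤ m)
    (hp : p + 1 ≤ S) : p ≤ f := by
  have h2 : S * 1 ≤ S * m := Nat.mul_le_mul_left _ hm
  have h3 : S * 1 = S := Nat.mul_one S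
  linarith

-- Scanning over a clean prefix only advances `count`, consuming one fuel per step.
theorem loopA_scan (k : Nat) : ∀ (P R : List Char) (count fuel : Nat),
    pvClean P → count + k = P.length → k ≤ fuel →
    loopA fuel (P ++ R) count = loopA (fuel - k) (P ++ R) P.length := by
  induction k with
  | zero => intro P R count fuel _ h _; simp_all
  | succ k ih =>
    intro P R count fuel hP hcnt hfuel
    obtain ⟨f, rfl⟩ : ∃ f, fuel = f + 1 := ⟨fuel - 1, by omega⟩
    have hlt : count < P.length := by omega
    have hget : (P ++ R)[count]? = some P[count] := by
      rw [List.getElem?_append_left hlt]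
      exact List.getElem?_eq_getElem hlt
    obtain ⟨hM, hN⟩ := pvClean_ne hP (List.getElem_mem hlt)
    have hlen : count < (P ++ R).length := by simp; omega
    rw [loopA_succ _ _ _ hlen, hget]
    rw [if_neg (by simp [hM]), if_neg (by simp [hM]), if_neg (by simp [hN]),
        if_neg (by simp [hN])]
    rw [ih P R (count+1) f hP (by omega) (by omega)]
    congr 1
    omega

-- Main invariant: with a clean processed prefix P in place and enough fuel,
-- A's loop from index |P| computes exactly B's single pass on the rest with stack P.
theorem loopA_main (n : Nat) : ∀ (R P : List Char) (fuel : Nat),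
    2 * R.length + R.countP (fun c => c == 'M' || c == 'N') ≤ n →
    pvClean P →
    (1 + P.length + R.length) * (2 * R.length + R.countP (fun c => c == 'M' || c == 'N')) ≤ fuel →
    loopA fuel (P ++ R) P.length = loopB R P.reverse := by
  induction n with
  | zero =>
    intro R P fuel hm _ _
    have hR : R = [] := by
      cases R with
      | nil => rfl
      | cons a l => simp at hm
    subst hR
    rw [loopA_stop _ _ _ (by simp), loopB_nil]
    simp
  | succ n ih =>
    intro R P fuel hm hP hfuel
    cases R with
    | nil =>
      rw [loopA_stop _ _ _ (by simp), loopB_nil]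
      simp
    | cons c R' =>
      have hcntle : R'.countP (fun c => c == 'M' || c == 'N') ≤ R'.length :=
        List.countP_le_length
      have hlen : P.length < (P ++ c :: R').length := by simp
      have hget : (P ++ c :: R')[P.length]? = some c := getAt P R' c
      obtain ⟨f, rfl⟩ : ∃ f, fuel = f + 1 := by
        refine ⟨fuel - 1, ?_⟩
        have h1 : 1 ≤ 2 * (c :: R').length + (c :: R').countP (fun c => c == 'M' || c == 'N') := by
          simp; omega
        have : 1 ≤ fuel := le_trans (by nlinarith) hfuel
        omega
      rw [loopA_succ _ _ _ hlen, hget]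
      by_cases hMc : c = 'M'
      · subst hMc
        have hcntR : ('M' :: R').countP (fun c => c == 'M' || c == 'N')
            = 1 + R'.countP (fun c => c == 'M' || c == 'N') := by
          simp [List.countP_cons]; omega
        rcases List.eq_nil_or_concat P with rfl | ⟨Q, t, rfl⟩
        · -- M at index 0: delete it, restart at index 0 = |[]|
          rw [if_neg (by simp), if_pos (by simp)]
          have he : (([] : List Char) ++ 'M' :: R').eraseIdx ([] : List Char).length
              = ([] : List Char) ++ R' := by
            rw [eraseIdx_len]; rfl
          rw [he]
          rw [show (0 : Nat) = ([] : List Char).length from rfl,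
              ih R' [] f (by simp at hm ⊢; omega)
                (by intro x hx; simp at hx)
                (by
                  rw [hcntR] at hfuel
                  have := fuel_arith
                    (S := 1 + ([] : List Char).length + ('M' :: R').length)
                    (S' := 1 + ([] : List Char).length + R'.length)
                    (m := 2 * ('M' :: R').length + (1 + R'.countP (fun c => c == 'M' || c == 'N')))
                    (m' := 2 * R'.length + R'.countP (fun c => c == 'M' || c == 'N'))
                    (f := f) (p := 0)
                    hfuel (by simp <;> omega) (by simp <;> omega) (by simp <;> omega)
                  simpa using this)]
          simp only [List.reverse_nil] at *
          rw [loopB_M_nil]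
        · -- M after a nonempty clean prefix Q ++ [t]: overwrite M with t, restart at 0
          rw [List.concat_eq_append] at *
          have hge1 : 1 ≤ (Q ++ [t]).length := by simp
          rw [if_pos (by exact ⟨rfl, hge1⟩)]
          rw [getPrev Q ('M' :: R') t]
          have hset : ((Q ++ [t]) ++ 'M' :: R').set (Q ++ [t]).length ((some t).getD ' ')
              = (Q ++ [t]) ++ t :: R' := setAt _ _ _ _
          rw [hset]
          obtain ⟨htM, htN⟩ := pvClean_ne hP (by simp : t ∈ Q ++ [t])
          have hcnt_t : (t :: R').countP (fun c => c == 'M' || c == 'N')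
              = R'.countP (fun c => c == 'M' || c == 'N') := by
            simp [List.countP_cons, htM, htN]
          have hm' : 2 * ('M'::R').length + ('M'::R').countP (fun c => c == 'M' || c == 'N') ≤ n + 1 := hm
          have hscanfuel : (Q ++ [t]).length ≤ f := by
            rw [hcntR] at hfuel
            exact scan_arith
              (S := 1 + (Q ++ [t]).length + ('M' :: R').length)
              (m := 2 * ('M' :: R').length + (1 + R'.countP (fun c => c == 'M' || c == 'N')))
              (p := (Q ++ [t]).length)
              hfuel (by simp <;> omega) (by simp <;> omega)
          rw [show (0 : Nat) = 0 + 0 from rfl]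
          rw [loopA_scan ((Q ++ [t]).length) (Q ++ [t]) (t :: R') 0 f hP (by simp) hscanfuel]
          rw [ih (t :: R') (Q ++ [t]) (f - (Q ++ [t]).length)
                (by rw [hcntR] at hm'; simp [hcnt_t] at hm' ⊢; omega)
                hP
                (by
                  rw [hcntR] at hfuel
                  exact fuel_arith
                    (S := 1 + (Q ++ [t]).length + ('M' :: R').length)
                    (S' := 1 + (Q ++ [t]).length + (t :: R').length)
                    (m := 2 * ('M' :: R').length + (1 + R'.countP (fun c => c == 'M' || c == 'N')))
                    (m' := 2 * (t :: R').length + (t :: R').countP (fun c => c == 'M' || c == 'N'))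
                    (f := f) (p := (Q ++ [t]).length)
                    hfuel (by simp <;> omega) (by simp [hcnt_t] <;> omega) (by simp <;> omega))]
          -- B side: both sides are one pass on R' with the stack topped by a second t
          have hBrev : (Q ++ [t]).reverse = t :: Q.reverse := by simp
          rw [show loopB ('M' :: R') (Q ++ [t]).reverse = loopB R' (t :: t :: Q.reverse) by
                rw [hBrev, loopB_M_cons],
              show loopB (t :: R') (Q ++ [t]).reverse = loopB R' (t :: t :: Q.reverse) by
                rw [hBrev, loopB_other _ _ htM htN]]
      · by_cases hNc : c = 'N'
        · subst hNc
          have hcntR : ('N' :: R').countP (fun c => c == 'M' || c == 'N')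
              = 1 + R'.countP (fun c => c == 'M' || c == 'N') := by
            simp [List.countP_cons]; omega
          rw [if_neg (by simp), if_neg (by simp)]
          cases R' with
          | nil =>
            -- N at the very end: just delete it
            rw [if_neg (by simp), if_pos (by simp)]
            have he : (P ++ ['N']).eraseIdx P.length = P ++ ([] : List Char) := by
              rw [eraseIdx_len]; rfl
            rw [he]
            have hscanfuel : P.length ≤ f := by
              exact scan_arith
                (S := 1 + P.length + (['N'] : List Char).length)
                (m := 2 * (['N'] : List Char).length
                  + (['N'] : List Char).countP (fun c => c == 'M' || c == 'N'))
                (p := P.length)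
                hfuel (by simp) (by simp <;> omega)
            rw [show (0 : Nat) = 0 + 0 from rfl]
            rw [loopA_scan P.length P [] 0 f hP (by simp) hscanfuel]
            rw [loopA_stop _ _ _ (by simp), loopB_N]
            simp [loopB_nil]
          | cons d R'' =>
            -- N followed by d: delete both, restart at 0
            rw [if_pos (by refine ⟨rfl, ?_⟩; simp only [List.length_append, List.length_cons]; omega)]
            have he : ((P ++ 'N' :: d :: R'').eraseIdx P.length).eraseIdx P.length
                = P ++ R'' := by
              rw [eraseIdx_len, show ('N' :: d :: R'').eraseIdx 0 = d :: R'' from rfl,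
                  eraseIdx_len]
              rfl
            rw [he]
            have hscanfuel : P.length ≤ f := by
              exact scan_arith
                (S := 1 + P.length + ('N' :: d :: R'').length)
                (m := 2 * ('N' :: d :: R'').length
                  + ('N' :: d :: R'').countP (fun c => c == 'M' || c == 'N'))
                (p := P.length)
                hfuel (by simp <;> omega) (by simp <;> omega)
            rw [show (0 : Nat) = 0 + 0 from rfl]
            rw [loopA_scan P.length P R'' 0 f hP (by simp) hscanfuel]
            rw [ih R'' P (f - P.length)
                  (by simp [List.countP_cons] at hm ⊢; omega)
                  hP
                  (by
                    exact fuel_arith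
                      (S := 1 + P.length + ('N' :: d :: R'').length)
                      (S' := 1 + P.length + R''.length)
                      (m := 2 * ('N' :: d :: R'').length
                        + ('N' :: d :: R'').countP (fun c => c == 'M' || c == 'N'))
                      (m' := 2 * R''.length + R''.countP (fun c => c == 'M' || c == 'N'))
                      (f := f) (p := P.length)
                      hfuel (by simp <;> omega)
                      (by simp [List.countP_cons] <;> omega) (by simp <;> omega))]
            rw [loopB_N, List.tail_cons]
        · -- ordinary character: advance past it
          rw [if_neg (by simp [hMc]), if_neg (by simp [hMc]), if_neg (by simp [hNc]),
              if_neg (by simp [hNc])]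
          have hcl : pvClean (P ++ [c]) := pvClean_append hP (by simp [hMc, hNc])
          have hcnt_c : (c :: R').countP (fun x => x == 'M' || x == 'N')
              = R'.countP (fun x => x == 'M' || x == 'N') := by
            simp [List.countP_cons, hMc, hNc]
          rw [show P.length + 1 = (P ++ [c]).length by simp,
              show P ++ c :: R' = (P ++ [c]) ++ R' by simp]
          rw [ih R' (P ++ [c]) f
                (by simp [hMc, hNc] at hm ⊢; omega)
                hcl
                (by
                  have := fuel_arith
                    (S := 1 + P.length + (c :: R').length)
                    (S' := 1 + (P ++ [c]).length + R'.length)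
                    (m := 2 * (c :: R').length + (c :: R').countP (fun x => x == 'M' || x == 'N'))
                    (m' := 2 * R'.length + R'.countP (fun x => x == 'M' || x == 'N'))
                    (f := f) (p := 0)
                    hfuel (by simp <;> omega)
                    (by simp [hcnt_c] <;> omega) (by simp <;> omega)
                  simpa using this)]
          rw [loopB_other _ _ hMc hNc]
          congr 1
          simp

-- ===== VERDICT (by name: the statement is the Claim_ definition above) =====
theorem StringChanges_spec : Claim_equal_StringChanges := by
  intro s _
  unfold Spec_StringChanges StringChanges StringChanges_alt
  congr 1
  have hcnt : s.toList.countP (fun c => c == 'M' || c == 'N') ≤ s.toList.length :=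
    List.countP_le_length
  have hfuel : (1 + ([] : List Char).length + s.toList.length)
      * (2 * s.toList.length + s.toList.countP (fun c => c == 'M' || c == 'N'))
      ≤ (s.toList.length + 1) * (3 * s.toList.length + 1) := by
    calc (1 + ([] : List Char).length + s.toList.length)
          * (2 * s.toList.length + s.toList.countP (fun c => c == 'M' || c == 'N'))
        = (s.toList.length + 1)
          * (2 * s.toList.length + s.toList.countP (fun c => c == 'M' || c == 'N')) := by
          simp only [List.length_nil]
          ring
      _ ≤ (s.toList.length + 1) * (3 * s.toList.length + 1) :=
          Nat.mul_le_mul_left _ (by omega)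
  have := loopA_main (2 * s.toList.length + s.toList.countP (fun c => c == 'M' || c == 'N'))
      s.toList [] ((s.toList.length + 1) * (3 * s.toList.length + 1)) (le_refl _)
      (by intro c h; simp at h) hfuel
  simpa using this
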